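-- pv_equiv track=rewrite | github.com/jailsonpj/FTC | pp2.py | vetor_transicao_b
-- ===== SOURCE A (Python) =====
-- def vetor_transicao_b(estados,matriz):
-- 	lista = []
-- 	matriz_transicao = []
--
-- 	for i in range(estados):
-- 		lista.append(matriz[i][1])
--
-- 	#lista.sort()
--
-- 	for i in range(estados): #matriz de funções de transição
-- 		coluna = []
-- 		matriz_transicao.append(coluna)
--
-- 	for i in range(estados):
-- 		for k in range(estados):
-- 			if(lista[i] == k):
-- 				matriz_transicao[i].append(1)
-- 			else:
-- 				matriz_transicao[i].append(0)
--
-- 	return matriz_transicao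
-- ===== SOURCE B (Python) =====
-- def vetor_transicao_b(estados, matriz):
--     matriz_transicao = []
--     for i in range(estados):
--         destino = matriz[i][1]
--         linha = [0] * estados
--         if 0 <= destino < estados:
--             linha[destino] = 1
--         matriz_transicao.append(linha)
--     return matriz_transicao
-- ===== Notes on version B (the rewrite author's own statement) =====
-- stated objective: simpler
-- what changed: Replaces A's three loops (collect column, pre-create empty rows, nested k-scan appending 0/1) with a single pass that builds each row as [0]*estados and sets the one 1 by direct index assignment when the target state is in range.
import Mathlib
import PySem

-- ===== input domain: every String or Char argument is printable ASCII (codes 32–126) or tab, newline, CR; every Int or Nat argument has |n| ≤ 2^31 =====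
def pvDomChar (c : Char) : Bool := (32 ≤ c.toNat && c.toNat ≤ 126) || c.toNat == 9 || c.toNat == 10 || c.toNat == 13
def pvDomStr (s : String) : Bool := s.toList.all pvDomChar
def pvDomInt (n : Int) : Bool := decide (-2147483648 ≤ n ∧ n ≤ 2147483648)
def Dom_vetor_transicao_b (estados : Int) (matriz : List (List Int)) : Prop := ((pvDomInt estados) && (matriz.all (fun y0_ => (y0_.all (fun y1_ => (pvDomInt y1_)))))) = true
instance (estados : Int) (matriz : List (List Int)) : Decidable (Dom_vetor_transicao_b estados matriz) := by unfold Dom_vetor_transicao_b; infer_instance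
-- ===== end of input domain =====

-- B builds each one-hot row in a single pass ([0]*estados with one direct index
-- assignment when the target is in range) instead of A's three loops with an inner
-- k-scan; objective: simpler. Equivalence of return values is proved on Pre_ below.

-- ===== PORT A =====
def vetor_transicao_b (estados : Int) (matriz : List (List Int)) : List (List Int) :=
  let lista : List Int :=
    (PySem.List.pyRange 0 estados 1).foldl
      (fun acc i => acc ++ [PySem.List.pyGetD (PySem.List.pyGetD matriz i []) 1 0]) []
  let matriz_transicao : List (List Int) :=
    (PySem.List.pyRange 0 estados 1).foldl (fun acc _ => acc ++ [([] : List Int)]) []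
  (PySem.List.pyRange 0 estados 1).foldl
    (fun mt i =>
      (PySem.List.pyRange 0 estados 1).foldl
        (fun mt k =>
          mt.modify i.toNat
            (fun row => row ++ [if PySem.List.pyGetD lista i 0 = k then (1 : Int) else 0]))
        mt)
    matriz_transicao

-- ===== PORT B =====
def vetor_transicao_b_alt (estados : Int) (matriz : List (List Int)) : List (List Int) :=
  (PySem.List.pyRange 0 estados 1).foldl
    (fun acc i =>
      let destino := PySem.List.pyGetD (PySem.List.pyGetD matriz i []) 1 0
      let linha := List.replicate estados.toNat (0 : Int)
      let linha := if 0 ≤ destino ∧ destino < estados then linha.set destino.toNat 1 else linha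
      acc ++ [linha]) []

-- ===== PRECONDITION & SPEC =====
-- Pre_ excludes exactly the inputs where Python A raises IndexError: estados rows
-- must exist and each of the first estados rows must have at least 2 entries.
def Pre_vetor_transicao_b (estados : Int) (matriz : List (List Int)) : Prop :=
  estados ≤ (matriz.length : Int) ∧ ∀ row ∈ matriz.take estados.toNat, 2 ≤ row.length
instance (estados : Int) (matriz : List (List Int)) : Decidable (Pre_vetor_transicao_b estados matriz) := by
  unfold Pre_vetor_transicao_b; infer_instance

def pvWitness_vetor_transicao_b : Int × List (List Int) := (2, [[0, 1], [5, 0]])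

def Spec_vetor_transicao_b (estados : Int) (matriz : List (List Int)) (out : List (List Int)) : Prop := out = vetor_transicao_b_alt estados matriz
instance (estados : Int) (matriz : List (List Int)) (out : List (List Int)) : Decidable (Spec_vetor_transicao_b estados matriz out) := by unfold Spec_vetor_transicao_b; infer_instance

-- ===== CLAIM (what is proved, stated in full; the proofs are below) =====
def Claim_equal_vetor_transicao_b : Prop := ∀ (estados : Int) (matriz : List (List Int)), Dom_vetor_transicao_b estados matriz → Pre_vetor_transicao_b estados matriz → Spec_vetor_transicao_b estados matriz (vetor_transicao_b estados matriz)

-- ===== LEMMAS AND PROOFS =====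

-- modify at a given index equal to the left part's length hits the head of the right part
lemma modify_append_length {α : Type} (xs : List α) (y : α) (ys : List α) (f : α → α)
    (n : Nat) (hn : xs.length = n) :
    (xs ++ y :: ys).modify n f = xs ++ f y :: ys := by
  subst hn
  induction xs with
  | nil => simp
  | cons a t ih => simpa using ih

-- A's inner k-loop: repeated modify at one index collapses to one modify with the mapped suffix
lemma inner_loop (j : Nat) (v : Int) (ks : List Int) : ∀ (mt : List (List Int)),
    List.foldl
      (fun m k => m.modify j (fun row => row ++ [if v = k then (1 : Int) else 0])) mt ks
    = mt.modify j (fun row => row ++ ks.map (fun k => if v = k then (1 : Int) else 0)) := by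
  induction ks with
  | nil =>
      intro mt
      simp only [List.foldl_nil, List.map_nil, List.append_nil]
      rw [show (fun (row : List Int) => row) = id from rfl, List.modify_id]
  | cons k ks ih =>
      intro mt
      rw [List.foldl_cons, ih, List.modify_modify_eq]
      congr 1
      funext row
      simp

-- A's outer loop: modifying each index of a replicate-of-empties once yields the map of the rows
lemma outer_loop (h : Nat → List Int) : ∀ (n : Nat) (tail : List (List Int)),
    List.foldl (fun m j => m.modify j (fun row => row ++ h j))
      (List.replicate n ([] : List Int) ++ tail) (List.range n)
    = (List.range n).map h ++ tail := by
  intro n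
  induction n with
  | zero => intro tail; simp
  | succ n ih =>
      intro tail
      rw [List.range_succ, List.foldl_append, List.replicate_succ', List.append_assoc]
      have : ([([] : List Int)] ++ tail) = ([] : List Int) :: tail := rfl
      rw [this, ih (([] : List Int) :: tail)]
      simp only [List.foldl_cons, List.foldl_nil]
      rw [modify_append_length _ _ _ _ n (by simp)]
      simp

lemma outer_loop' (h : Nat → List Int) (n : Nat) :
    List.foldl (fun m j => m.modify j (fun row => row ++ h j))
      (List.replicate n ([] : List Int)) (List.range n)
    = (List.range n).map h := by
  simpa using outer_loop h n []

-- the one-hot row: comparison scan over range n equals replicate-with-set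
lemma row_eq (v : Int) (n : Nat) :
    List.map ((fun k => if v = k then (1 : Int) else 0) ∘ (fun k : Nat => (k : Int)))
      (List.range n)
    = if 0 ≤ v ∧ v < (n : Int) then (List.replicate n (0 : Int)).set v.toNat 1
      else List.replicate n (0 : Int) := by
  simp only [Function.comp_def]
  induction n with
  | zero => split_ifs <;> simp
  | succ n ih =>
      rw [List.range_succ, List.map_append, ih, List.replicate_succ']
      by_cases h : 0 ≤ v ∧ v < (n : Int)
      · have h' : 0 ≤ v ∧ v < ((n + 1 : Nat) : Int) := by push_cast; omega
        rw [if_pos h, if_pos h']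
        have hv : ¬ v = (n : Int) := by omega
        rw [List.set_append_left _ _ (by simp; omega)]
        simp [hv]
      · by_cases h2 : v = (n : Int)
        · subst h2
          have h' : 0 ≤ (n : Int) ∧ (n : Int) < ((n + 1 : Nat) : Int) := by push_cast; omega
          rw [if_neg h, if_pos h']
          rw [List.set_append_right _ _ (by simp)]
          simp
        · have h' : ¬ (0 ≤ v ∧ v < ((n + 1 : Nat) : Int)) := by
            push_cast; push_cast at h2; omega
          rw [if_neg h, if_neg h']
          simp [h2]

-- ===== VERDICT (by name: the statement is the Claim_ definition above) =====
theorem vetor_transicao_b_spec : Claim_equal_vetor_transicao_b := by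
  intro estados matriz _ _
  unfold Spec_vetor_transicao_b vetor_transicao_b vetor_transicao_b_alt
  set g : Int → Int := fun i => PySem.List.pyGetD (PySem.List.pyGetD matriz i []) 1 0 with hg
  by_cases hn : estados ≤ 0
  · rw [PySem.List.pyRange_one_eq_nil hn]
    simp
  · have h0 : estados = ((estados.toNat : Nat) : Int) := by omega
    obtain ⟨n, hne⟩ : ∃ n : Nat, estados = (n : Int) := ⟨estados.toNat, h0⟩
    subst hne
    -- lista is the map of g over the range
    rw [PySem.List.foldl_append_singleton_eq_map, List.nil_append]
    -- the initial matriz_transicao is replicate n []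
    rw [show (List.foldl (fun acc _ => acc ++ [([] : List Int)]) []
          (PySem.List.pyRange 0 (n : Int) 1))
        = List.replicate n ([] : List Int) by
      rw [PySem.List.foldl_append_singleton_eq_map, List.nil_append, List.map_const',
        PySem.List.length_pyRange_one]
      simp]
    -- replace the lista lookup by g i inside the outer loop
    rw [PySem.List.foldl_congr_mem _ _
        (fun mt i =>
          List.foldl (fun mt k => mt.modify i.toNat
            (fun row => row ++ [if g i = k then (1 : Int) else 0])) mt
            (PySem.List.pyRange 0 (n : Int) 1)) _
        (by
          intro acc i hi
          obtain ⟨h0, h1⟩ := (PySem.List.mem_pyRange_one).1 hi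
          rw [PySem.List.pyGetD_map_pyRange_of_nonneg g (n : Int) i 0 h0 h1])]
    simp only [inner_loop]
    rw [PySem.List.pyRange_zero_natCast, List.foldl_map]
    simp only [Int.toNat_natCast, List.map_map]
    rw [outer_loop' (fun j => List.map
        ((fun k => if g (j : Int) = k then (1 : Int) else 0) ∘ (fun k : Nat => (k : Int)))
        (List.range n)) n]
    -- B's single pass is the map of the one-hot rows
    rw [PySem.List.foldl_append_singleton_eq_map, List.nil_append, List.map_map]
    refine List.map_congr_left ?_
    intro j hj
    rw [row_eq (g (j : Int)) n]
    simp [hg]
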